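-- pv_equiv track=rewrite | github.com/Awfa/aoc2025 | day10_1.py | findMinimumButtonsPressedForMachine
-- ===== SOURCE A (Python) =====
-- from collections import deque
--
-- def findMinimumButtonsPressedForMachine(machine):
--     indicatorTargets, diagrams, _ = machine
--     lightAmount = len(indicatorTargets)
--     # do a breadth-first search to find the minimum amount of buttons to press
--     toSearch = deque()
--     visited = set()
--
--     for d in diagrams:
--         toSearch.append((d, [False] * lightAmount, 0))
--     while len(toSearch) > 0:
--         diagramToSearch, currentState, presses = toSearch.popleft()
--         if currentState == indicatorTargets:
--             return presses
--
--         for x in diagramToSearch: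
--             currentState[x] = not currentState[x]
--         if tuple(currentState) in visited:
--             continue
--         else:
--             visited.add(tuple(currentState))
--         for d in diagrams:
--             toSearch.append((d, list(currentState), presses + 1))
--     return None
-- ===== SOURCE B (Python) =====
-- # B: instead of BFS over light states, search subsets of diagrams by increasing
-- # size: each diagram's effect is a fixed toggle pattern, and pressing a set of
-- # buttons XORs their patterns, so the answer is the smallest combination of
-- # diagrams whose combined toggle pattern equals the target.
--
-- def _effect(d, n):
--     state = [False] * n
--     for x in d:
--         state[x] = not state[x]
--     return state
--
--
-- def _xor(p, q):
--     return [a != b for a, b in zip(p, q)]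
--
--
-- def _search(effects, start, k, acc, target):
--     # is there a size-k combination taken from effects[start:] whose XOR with
--     # acc equals target?
--     if k == 0:
--         return acc == target
--     for i in range(start, len(effects) - k + 1):
--         if _search(effects, i + 1, k - 1, _xor(acc, effects[i]), target):
--             return True
--     return False
--
--
-- def findMinimumButtonsPressedForMachine(machine):
--     targets, diagrams, _ = machine
--     n = len(targets)
--     if targets == [False] * n:
--         return 0
--     effects = [_effect(d, n) for d in diagrams]
--     for k in range(1, len(diagrams) + 1):
--         if _search(effects, 0, k, [False] * n, targets):
--             return k
--     return None
-- ===== Notes on version B (the rewrite author's own statement) =====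
-- stated objective: alternative
-- what changed: Replaces A's queue-based BFS over mutable light states with a combinatorial search: each diagram is reduced once to its toggle pattern and subsets of diagrams are tried in increasing size, returning the smallest subset whose XOR of patterns equals the target.
-- intended difference: On machines whose target is already all-off but whose diagram list is empty, A returns None (its BFS queue starts empty) while B returns 0, the intended answer since zero presses already match the target. — e.g. on findMinimumButtonsPressedForMachine([false], [], 0): A returns none, B returns some 0
import Mathlib
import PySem

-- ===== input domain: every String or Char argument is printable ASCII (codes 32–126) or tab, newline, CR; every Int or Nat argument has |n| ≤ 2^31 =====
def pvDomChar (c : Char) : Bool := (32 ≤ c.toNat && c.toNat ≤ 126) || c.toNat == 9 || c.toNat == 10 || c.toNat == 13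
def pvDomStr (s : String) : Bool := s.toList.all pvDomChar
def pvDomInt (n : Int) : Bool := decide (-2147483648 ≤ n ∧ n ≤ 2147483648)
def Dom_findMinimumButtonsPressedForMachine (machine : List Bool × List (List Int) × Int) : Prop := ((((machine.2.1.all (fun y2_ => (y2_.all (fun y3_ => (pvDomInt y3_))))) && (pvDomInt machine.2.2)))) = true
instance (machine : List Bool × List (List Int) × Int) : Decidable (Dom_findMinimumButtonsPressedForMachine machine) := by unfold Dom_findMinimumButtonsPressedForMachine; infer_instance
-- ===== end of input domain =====

-- B replaces A's breadth-first search over mutable light states by a smallest-subset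
-- search over the diagrams' toggle patterns (objective: alternative algorithm).
-- Intended difference (D_): target already all-off with no diagrams — A returns none, B returns 0.

-- ===== PORT A =====

-- currentState[x] = not currentState[x]  (none = IndexError)
def pvToggle1 (st : Option (List Bool)) (x : Int) : Option (List Bool) :=
  st.bind fun s => (PySem.List.pyGet? s x).bind fun b => PySem.List.pySet? s x (!b)

-- the 'for x in diagramToSearch: currentState[x] = not currentState[x]' loop
def pvToggleAll (s : List Bool) (d : List Int) : Option (List Bool) :=
  d.foldl pvToggle1 (some s)

-- termination helpers for the BFS loop (used only by its decreasing_by)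
def pvAllStates : Nat → List (List Bool)
  | 0 => [[]]
  | n + 1 => (pvAllStates n).flatMap fun s => [false :: s, true :: s]

theorem pvAllStates_mem (n : Nat) (s : List Bool) (h : s.length = n) : s ∈ pvAllStates n := by
  induction n generalizing s with
  | zero => simp [pvAllStates, List.length_eq_zero_iff.mp h]
  | succ m ih =>
    cases s with
    | nil => simp at h
    | cons b t =>
      simp only [pvAllStates, List.mem_flatMap]
      exact ⟨t, ih t (by simpa using h), by cases b <;> simp⟩

theorem pvFilter_len_le {α : Type} (l : List α) (p q : α → Bool)
    (h : ∀ a, q a = true → p a = true) : (l.filter q).length ≤ (l.filter p).length := by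
  induction l with
  | nil => simp
  | cons a t ih =>
    by_cases hq : q a = true
    · simp [List.filter_cons, hq, h a hq]; omega
    · simp only [List.filter_cons, Bool.not_eq_true] at *
      cases hp : p a <;> simp [hq, hp] <;> omega

theorem pvFilter_len_lt {α : Type} (l : List α) (p q : α → Bool)
    (h : ∀ a, q a = true → p a = true) (x : α) (hx : x ∈ l)
    (hpx : p x = true) (hqx : q x = false) :
    (l.filter q).length < (l.filter p).length := by
  induction l with
  | nil => simp at hx
  | cons a t ih =>
    rcases List.mem_cons.mp hx with h1 | h1
    · subst h1
      have := pvFilter_len_le t p q h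
      simp [hpx, hqx]; omega
    · have := ih h1
      by_cases hq : q a = true
      · simp [hq, h a hq]; omega
      · simp only [Bool.not_eq_true] at hq
        cases hp : p a <;> simp [hq, hp] <;> omega

def pvRemaining (n : Nat) (v : PySem.Set (List Bool)) : Nat :=
  ((pvAllStates n).filter fun s => !(PySem.Set.contains v s)).length

theorem pvRemaining_lt (n : Nat) (v : PySem.Set (List Bool)) (s' : List Bool)
    (h1 : s'.length = n) (h2 : ¬ PySem.Set.contains v s' = true) :
    pvRemaining n (PySem.Set.add v s') < pvRemaining n v := by
  have hsv : s' ∉ v := fun hm => h2 ((PySem.Set.contains_iff v s').mpr hm)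
  have himp : ∀ a : List Bool, (!(PySem.Set.contains (PySem.Set.add v s') a)) = true →
      (!(PySem.Set.contains v a)) = true := by
    intro a ha
    have hna : a ∉ PySem.Set.add v s' := by
      intro hm
      rw [(PySem.Set.contains_iff _ a).mpr hm] at ha
      simp at ha
    have hav : a ∉ v := fun hm => hna ((PySem.Set.mem_add v s' a).mpr (Or.inl hm))
    cases hc : PySem.Set.contains v a with
    | false => simp [hc]
    | true => exact absurd ((PySem.Set.contains_iff v a).mp hc) hav
  have hp : (!(PySem.Set.contains v s')) = true := by simpa using hsv
  have hq : (!(PySem.Set.contains (PySem.Set.add v s') s')) = false := by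
    simpa using (PySem.Set.mem_add v s' s').mpr (Or.inr rfl)
  exact pvFilter_len_lt _ _ _ himp s' (pvAllStates_mem n s' h1) hp hq

-- the 'while len(toSearch) > 0' BFS loop
def pvBfs (diagrams : List (List Int)) (target : List Bool) :
    List (List Int × List Bool × Int) → PySem.Set (List Bool) → Option Int
  | [], _ => none
  | (d, s, p) :: rest, visited =>
    if s = target then some p
    else
      match pvToggleAll s d with
      | none => none  -- Python raises IndexError here (input outside Pre_)
      | some s' =>
        if PySem.Set.contains visited s' then pvBfs diagrams target rest visited
        else if hn : s'.length = target.length then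
          pvBfs diagrams target (rest ++ diagrams.map fun d' => (d', s', p + 1))
            (PySem.Set.add visited s')
        else none  -- totality guard: never taken from the entry point (toggling keeps the state's length)
termination_by q v => (pvRemaining target.length v, q.length)
decreasing_by
  · exact Prod.Lex.right _ (by simp)
  · exact Prod.Lex.left _ _ (pvRemaining_lt _ _ _ hn (by simp_all))

def findMinimumButtonsPressedForMachine (machine : List Bool × List (List Int) × Int) : Option Int :=
  let indicatorTargets := machine.1
  let diagrams := machine.2.1
  let lightAmount := indicatorTargets.length
  pvBfs diagrams indicatorTargets
    (diagrams.map fun d => (d, List.replicate lightAmount false, 0)) PySem.Set.empty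

-- ===== PORT B =====

-- _xor: [a != b for a, b in zip(p, q)]
def pvXor (p q : List Bool) : List Bool := List.zipWith (fun a b => a != b) p q

-- _effect: the same flip loop as A's (Source B shares the statement 'state[x] = not state[x]'),
-- run on a fresh all-False list (none = IndexError)
def pvEffect (d : List Int) (n : Nat) : Option (List Bool) :=
  d.foldl pvToggle1 (some (List.replicate n false))

-- [ _effect(d, n) for d in diagrams ], propagating the IndexError case
def pvSeq : List (Option (List Bool)) → Option (List (List Bool))
  | [] => some []
  | o :: t => o.bind fun x => (pvSeq t).map (x :: ·)

-- _search; the Python recursion only ever sees k ≥ 0, so k is a Nat in the port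
def pvSearch (effects : List (List Bool)) (target : List Bool) : Int → Nat → List Bool → Bool
  | _, 0, acc => decide (acc = target)
  | start, k + 1, acc =>
    (PySem.List.pyRange start ((effects.length : Int) - (k + 1) + 1) 1).any fun i =>
      match PySem.List.pyGet? effects i with
      | some e => pvSearch effects target (i + 1) k (pvXor acc e)
      | none => false  -- unreachable: every i the range produces is a valid index

def findMinimumButtonsPressedForMachine_alt (machine : List Bool × List (List Int) × Int) : Option Int :=
  let targets := machine.1
  let diagrams := machine.2.1
  let n := targets.length
  if targets = List.replicate n false then some 0
  else
    match pvSeq (diagrams.map fun d => pvEffect d n) with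
    | none => none  -- Python raises IndexError here (input outside Pre_)
    | some effects =>
      (PySem.List.pyRange 1 ((diagrams.length : Int) + 1) 1).findSome? fun k =>
        if pvSearch effects targets 0 k.toNat (List.replicate n false) then some k else none

-- ===== PRECONDITION & SPEC =====

-- Pre_ excludes exactly the machines on which A raises IndexError: some diagram holds an
-- index out of range for the light list, and the target is not already all-off (A returns
-- 0 before touching any diagram when the target is all-off and a diagram exists).
def Pre_findMinimumButtonsPressedForMachine (machine : List Bool × List (List Int) × Int) : Prop :=
  (∀ d ∈ machine.2.1, ∀ x ∈ d, -(machine.1.length : Int) ≤ x ∧ x < (machine.1.length : Int))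
  ∨ (machine.1 = List.replicate machine.1.length false ∧ machine.2.1 ≠ [])
instance (machine : List Bool × List (List Int) × Int) : Decidable (Pre_findMinimumButtonsPressedForMachine machine) := by
  unfold Pre_findMinimumButtonsPressedForMachine; infer_instance

def pvWitness_findMinimumButtonsPressedForMachine : (List Bool × List (List Int) × Int) :=
  ([true, false], [[0], [1, 0]], 0)

-- On machines whose target is already all-off but whose diagram list is empty, A returns
-- None (its BFS queue starts empty) while B returns 0, the intended answer since zero
-- presses already match the target.
def D_findMinimumButtonsPressedForMachine (machine : List Bool × List (List Int) × Int) : Prop :=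
  machine.2.1 = [] ∧ machine.1 = List.replicate machine.1.length false
instance (machine : List Bool × List (List Int) × Int) : Decidable (D_findMinimumButtonsPressedForMachine machine) := by
  unfold D_findMinimumButtonsPressedForMachine; infer_instance

def Spec_findMinimumButtonsPressedForMachine (machine : List Bool × List (List Int) × Int) (out : Option Int) : Prop :=
  ¬ D_findMinimumButtonsPressedForMachine machine → out = findMinimumButtonsPressedForMachine_alt machine
instance (machine : List Bool × List (List Int) × Int) (out : Option Int) : Decidable (Spec_findMinimumButtonsPressedForMachine machine out) := by
  unfold Spec_findMinimumButtonsPressedForMachine; infer_instance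

def pvDiffWitness_findMinimumButtonsPressedForMachine : (List Bool × List (List Int) × Int) :=
  ([false], [], 0)

def pvDiffWitnessOut_findMinimumButtonsPressedForMachine : (Option Int) × (Option Int) :=
  (none, some 0)

-- ===== CLAIM (what is proved, stated in full; the proofs are below) =====
def Claim_unchanged_findMinimumButtonsPressedForMachine : Prop := ∀ (machine : List Bool × List (List Int) × Int), Dom_findMinimumButtonsPressedForMachine machine → Pre_findMinimumButtonsPressedForMachine machine → Spec_findMinimumButtonsPressedForMachine machine (findMinimumButtonsPressedForMachine machine)
def Claim_changed_findMinimumButtonsPressedForMachine : Prop := Dom_findMinimumButtonsPressedForMachine (pvDiffWitness_findMinimumButtonsPressedForMachine) ∧ Pre_findMinimumButtonsPressedForMachine (pvDiffWitness_findMinimumButtonsPressedForMachine) ∧ D_findMinimumButtonsPressedForMachine (pvDiffWitness_findMinimumButtonsPressedForMachine) ∧ findMinimumButtonsPressedForMachine (pvDiffWitness_findMinimumButtonsPressedForMachine) = pvDiffWitnessOut_findMinimumButtonsPressedForMachine.1 ∧ findMinimumButtonsPressedForMachine_alt (pvDiffWitness_findMinimumButtonsPressedForMachine) = pvDiffWitnessOut_findMinimumButtonsPressedForMachine.2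 ∧ pvDiffWitnessOut_findMinimumButtonsPressedForMachine.1 ≠ pvDiffWitnessOut_findMinimumButtonsPressedForMachine.2
def Claim_exact_findMinimumButtonsPressedForMachine : Prop := ∀ (machine : List Bool × List (List Int) × Int), Dom_findMinimumButtonsPressedForMachine machine → Pre_findMinimumButtonsPressedForMachine machine → D_findMinimumButtonsPressedForMachine machine → findMinimumButtonsPressedForMachine machine ≠ findMinimumButtonsPressedForMachine_alt machine

-- ===== LEMMAS AND PROOFS =====

theorem pvXor_length (p q : List Bool) : (pvXor p q).length = min p.length q.length := by
  simp [pvXor]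

theorem pvXor_comm (p q : List Bool) : pvXor p q = pvXor q p := by
  induction p generalizing q with
  | nil => cases q <;> simp [pvXor]
  | cons a p ih =>
    cases q with
    | nil => simp [pvXor]
    | cons b q => simp [pvXor] at *; exact ⟨by cases a <;> cases b <;> rfl, ih q⟩

theorem pvXor_assoc (p q r : List Bool) : pvXor (pvXor p q) r = pvXor p (pvXor q r) := by
  induction p generalizing q r with
  | nil => simp [pvXor]
  | cons a p ih =>
    cases q with
    | nil => simp [pvXor]
    | cons b q =>
      cases r with
      | nil => simp [pvXor]
      | cons c r =>
        simp only [pvXor, List.zipWith_cons_cons]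
        rw [show ((a != b) != c) = (a != (b != c)) by cases a <;> cases b <;> cases c <;> rfl]
        exact congrArg (List.cons _) (ih q r)

theorem pvXor_false_left (p : List Bool) : pvXor (List.replicate p.length false) p = p := by
  induction p with
  | nil => rfl
  | cons a p ih => simpa [pvXor, List.replicate_succ] using ih

theorem pvXor_false_right (p : List Bool) : pvXor p (List.replicate p.length false) = p := by
  rw [pvXor_comm]; exact pvXor_false_left p

theorem pvXor_self (p : List Bool) : pvXor p p = List.replicate p.length false := by
  induction p with
  | nil => rfl
  | cons a p ih =>
    simp only [pvXor, List.zipWith_cons_cons, List.length_cons, List.replicate_succ, bne_self_eq_false]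
    exact congrArg (List.cons _) ih

theorem pvXor_cancel (p q : List Bool) (h : p.length = q.length) : pvXor p (pvXor p q) = q := by
  rw [← pvXor_assoc, pvXor_self, h, pvXor_false_left]

theorem pvXor_left_comm (a b c : List Bool) : pvXor a (pvXor b c) = pvXor b (pvXor a c) := by
  rw [← pvXor_assoc, pvXor_comm a b, pvXor_assoc]

def pvIdx (len : Nat) (x : Int) : Nat := if 0 ≤ x then x.toNat else len - (-x).toNat
theorem pvIdx_lt (len : Nat) (x : Int) (h1 : -(len:Int) ≤ x) (h2 : x < len) :
    pvIdx len x < len := by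
  unfold pvIdx; split <;> omega
theorem pvSetD_valid {α : Type} (s : List α) (x : Int) (v : α)
    (h1 : -(s.length:Int) ≤ x) (h2 : x < s.length) :
    PySem.List.pySetD s x v = s.set (pvIdx s.length x) v := by
  unfold PySem.List.pySetD PySem.List.pySet? PySem.List.pyIdx? pvIdx
  split_ifs <;> simp_all
theorem pvGetD_valid {α : Type} (s : List α) (x : Int) (d : α)
    (h1 : -(s.length:Int) ≤ x) (h2 : x < s.length) :
    PySem.List.pyGetD s x d = s.getD (pvIdx s.length x) d := by
  unfold PySem.List.pyGetD PySem.List.pyGet? PySem.List.pyIdx? pvIdx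
  split_ifs <;> simp_all [List.getD]
theorem pvGet?_valid {α : Type} (s : List α) (x : Int)
    (h1 : -(s.length:Int) ≤ x) (h2 : x < s.length) :
    PySem.List.pyGet? s x = s[pvIdx s.length x]? := by
  unfold PySem.List.pyGet? PySem.List.pyIdx? pvIdx
  split_ifs <;> simp_all
theorem pvSet?_valid {α : Type} (s : List α) (x : Int) (v : α)
    (h1 : -(s.length:Int) ≤ x) (h2 : x < s.length) :
    PySem.List.pySet? s x v = some (PySem.List.pySetD s x v) := by
  unfold PySem.List.pySetD PySem.List.pySet? PySem.List.pyIdx?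
  split_ifs <;> simp_all

-- total toggle
def pvTogT (s : List Bool) (x : Int) : List Bool :=
  PySem.List.pySetD s x (!(PySem.List.pyGetD s x false))
def pvTogA (s : List Bool) (d : List Int) : List Bool := d.foldl pvTogT s
def pvEff (n : Nat) (d : List Int) : List Bool := pvTogA (List.replicate n false) d

theorem pvTogT_length (s : List Bool) (x : Int) : (pvTogT s x).length = s.length := by
  unfold pvTogT; rw [PySem.List.length_pySetD]

theorem pvTogA_length (s : List Bool) (d : List Int) : (pvTogA s d).length = s.length := by
  induction d generalizing s with
  | nil => rfl
  | cons x d ih => unfold pvTogA at *; rw [List.foldl_cons, ih, pvTogT_length]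

theorem pvEff_length (n : Nat) (d : List Int) : (pvEff n d).length = n := by
  unfold pvEff; rw [pvTogA_length, List.length_replicate]

theorem pvToggle1_some (s : List Bool) (x : Int)
    (h1 : -(s.length:Int) ≤ x) (h2 : x < s.length) :
    pvToggle1 (some s) x = some (pvTogT s x) := by
  have hj := pvIdx_lt s.length x h1 h2
  unfold pvToggle1 pvTogT
  rw [Option.bind_some, pvGet?_valid s x h1 h2, List.getElem?_eq_getElem hj,
    Option.bind_some, pvSet?_valid s x _ h1 h2, pvGetD_valid s x false h1 h2,
    List.getD_eq_getElem _ _ hj]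

theorem pvToggleAll_some (s : List Bool) (d : List Int)
    (h : ∀ x ∈ d, -(s.length:Int) ≤ x ∧ x < s.length) :
    pvToggleAll s d = some (pvTogA s d) := by
  induction d generalizing s with
  | nil => rfl
  | cons x d ih =>
    unfold pvToggleAll pvTogA at *
    rw [List.foldl_cons, List.foldl_cons,
      pvToggle1_some s x (h x (by simp)).1 (h x (by simp)).2]
    exact ih (pvTogT s x) (by intro y hy; rw [pvTogT_length]; exact h y (by simp [hy]))


theorem pvTogT_xor (a b : List Bool) (x : Int) (hab : a.length = b.length)
    (h1 : -(b.length:Int) ≤ x) (h2 : x < b.length) :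
    pvTogT (pvXor a b) x = pvXor a (pvTogT b x) := by
  have hlx : (pvXor a b).length = b.length := by rw [pvXor_length, hab, Nat.min_self]
  have hj : pvIdx b.length x < b.length := pvIdx_lt b.length x h1 h2
  have hja : pvIdx b.length x < a.length := hab ▸ hj
  have hjx : pvIdx b.length x < (pvXor a b).length := hlx ▸ hj
  unfold pvTogT
  rw [pvSetD_valid _ x _ (by rw [hlx]; exact h1) (by rw [hlx]; exact h2),
    pvGetD_valid _ x _ (by rw [hlx]; exact h1) (by rw [hlx]; exact h2),
    pvSetD_valid b x _ h1 h2, pvGetD_valid b x _ h1 h2, hlx]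
  set j := pvIdx b.length x with hjdef
  set v1 := !((pvXor a b).getD j false) with hv1
  set v2 := !(b.getD j false) with hv2
  have hv1' : v1 = !(a[j]'hja != b[j]'hj) := by
    rw [hv1, List.getD_eq_getElem _ _ hjx]; simp [pvXor]
  have hv2' : v2 = !(b[j]'hj) := by rw [hv2, List.getD_eq_getElem _ _ hj]
  apply List.ext_getElem
  · simp [pvXor, hab]
  · intro i hi1 hi2
    have hi : i < b.length := by simpa [hlx] using hi1
    have hia : i < a.length := hab ▸ hi
    rw [List.getElem_set]
    simp only [pvXor, List.getElem_zipWith, List.getElem_set]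
    by_cases hij : j = i
    · subst hij
      simp [hv1', hv2']
    · simp [if_neg hij, pvXor]

theorem pvTogA_xor (a : List Bool) (d : List Int) (b : List Bool) (hab : a.length = b.length)
    (hv : ∀ x ∈ d, -(b.length:Int) ≤ x ∧ x < b.length) :
    pvTogA (pvXor a b) d = pvXor a (pvTogA b d) := by
  induction d generalizing b with
  | nil => rfl
  | cons x d ih =>
    unfold pvTogA at *
    rw [List.foldl_cons, List.foldl_cons,
      pvTogT_xor a b x hab (hv x (by simp)).1 (hv x (by simp)).2]
    exact ih (pvTogT b x) (by rw [pvTogT_length]; exact hab)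
      (by intro y hy; rw [pvTogT_length]; exact hv y (by simp [hy]))

-- ===== reachability =====
def pvReach (z : List Bool) (efs : List (List Bool)) (k : Nat) (u : List Bool) : Prop :=
  ∃ l : List (List Bool), l.length = k ∧ (∀ e ∈ l, e ∈ efs) ∧ l.foldl pvXor z = u

theorem pvReach_zero (z : List Bool) (efs : List (List Bool)) (u : List Bool) :
    pvReach z efs 0 u ↔ u = z := by
  constructor
  · rintro ⟨l, hl, _, hf⟩; rw [List.length_eq_zero_iff.mp hl] at hf; simpa using hf.symm
  · rintro rfl; exact ⟨[], rfl, by simp, rfl⟩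

theorem pvFoldl_xor_translate (l : List (List Bool)) (a b : List Bool) :
    l.foldl pvXor (pvXor a b) = pvXor a (l.foldl pvXor b) := by
  induction l generalizing b with
  | nil => rfl
  | cons e l ih => rw [List.foldl_cons, List.foldl_cons, pvXor_assoc, ih]

theorem pvFoldl_xor_length (l : List (List Bool)) (z : List Bool)
    (h : ∀ e ∈ l, e.length = z.length) : (l.foldl pvXor z).length = z.length := by
  induction l generalizing z with
  | nil => rfl
  | cons e l ih =>
    rw [List.foldl_cons]
    have hz : (pvXor z e).length = z.length := by
      rw [pvXor_length, h e (by simp), Nat.min_self]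
    rw [ih (pvXor z e) (by intro e' he'; rw [hz]; exact h e' (by simp [he'])), hz]

theorem pvReach_length (z : List Bool) (efs : List (List Bool)) (k : Nat) (u : List Bool)
    (hefs : ∀ e ∈ efs, e.length = z.length) (h : pvReach z efs k u) : u.length = z.length := by
  obtain ⟨l, _, hm, hf⟩ := h
  rw [← hf]; exact pvFoldl_xor_length l z (fun e he => hefs e (hm e he))

theorem pvReach_step (z : List Bool) (efs : List (List Bool)) (k : Nat) (u e : List Bool)
    (h : pvReach z efs k u) (he : e ∈ efs) : pvReach z efs (k+1) (pvXor u e) := by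
  obtain ⟨l, hl, hm, hf⟩ := h
  refine ⟨l ++ [e], by simp [hl], ?_, by simp [List.foldl_append, hf]⟩
  intro e' he'
  rcases List.mem_append.mp he' with h' | h'
  · exact hm e' h'
  · simp at h'; subst h'; exact he

theorem pvReach_comp (z : List Bool) (efs : List (List Bool)) (a b : Nat) (x y : List Bool)
    (hefs : ∀ e ∈ efs, e.length = z.length) (hz : z = List.replicate z.length false)
    (hx : pvReach z efs a x) (hy : pvReach z efs b y) : pvReach z efs (a+b) (pvXor x y) := by
  obtain ⟨l1, hl1, hm1, hf1⟩ := hx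
  obtain ⟨l2, hl2, hm2, hf2⟩ := hy
  refine ⟨l1 ++ l2, by simp [hl1, hl2],
    fun e' he' => (List.mem_append.mp he').elim (hm1 e') (hm2 e'), ?_⟩
  have hxlen : x.length = z.length := pvReach_length z efs a x hefs ⟨l1, hl1, hm1, hf1⟩
  have hxz : pvXor x z = x := by
    rw [hz, ← hxlen]  -- careful: pvXor x (replicate x.length false) = x
    exact pvXor_false_right x
  rw [List.foldl_append, hf1, ← hxz, pvFoldl_xor_translate, hf2, hxz]

theorem pvReach_peel (z : List Bool) (efs : List (List Bool)) (k : Nat) (v : List Bool)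
    (hefs : ∀ e ∈ efs, e.length = z.length)
    (h : pvReach z efs (k+1) v) : ∃ e ∈ efs, pvReach z efs k (pvXor e v) := by
  obtain ⟨l, hl, hm, hf⟩ := h
  cases l with
  | nil => simp at hl
  | cons e l' =>
    have he : e ∈ efs := hm e (by simp)
    have hm' : ∀ e' ∈ l', e' ∈ efs := fun e' he' => hm e' (by simp [he'])
    have hw : (e :: l').foldl pvXor z = pvXor e (l'.foldl pvXor z) := by
      rw [List.foldl_cons, pvXor_comm, pvFoldl_xor_translate]
    refine ⟨e, he, l', by simpa using hl, hm', ?_⟩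
    have hwl : (l'.foldl pvXor z).length = z.length :=
      pvFoldl_xor_length l' z (fun e' he' => hefs e' (hm' e' he'))
    rw [← hf, hw, pvXor_cancel e _ (by rw [hwl, hefs e he])]

noncomputable def pvDist (z : List Bool) (efs : List (List Bool)) (u : List Bool) : Nat :=
  letI : DecidablePred fun k => pvReach z efs k u := fun _ => Classical.propDecidable _
  letI : Decidable (∃ k, pvReach z efs k u) := Classical.propDecidable _
  if h : ∃ k, pvReach z efs k u then Nat.find h else 0

theorem pvDist_spec (z : List Bool) (efs : List (List Bool)) (u : List Bool)
    (h : ∃ k, pvReach z efs k u) : pvReach z efs (pvDist z efs u) u := by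
  unfold pvDist
  letI : DecidablePred fun k => pvReach z efs k u := fun _ => Classical.propDecidable _
  letI : Decidable (∃ k, pvReach z efs k u) := Classical.propDecidable _
  rw [dif_pos h]
  exact Nat.find_spec h

theorem pvDist_le (z : List Bool) (efs : List (List Bool)) (k : Nat) (u : List Bool)
    (h : pvReach z efs k u) : pvDist z efs u ≤ k := by
  unfold pvDist
  letI : DecidablePred fun k => pvReach z efs k u := fun _ => Classical.propDecidable _
  letI : Decidable (∃ k, pvReach z efs k u) := Classical.propDecidable _
  rw [dif_pos ⟨k, h⟩]
  exact Nat.find_min' _ h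

theorem pvDist_eq_zero (z : List Bool) (efs : List (List Bool)) (u : List Bool)
    (h : ∃ k, pvReach z efs k u) (h0 : pvDist z efs u = 0) : u = z :=
  (pvReach_zero z efs u).mp (h0 ▸ pvDist_spec z efs u h)

theorem pvDist_first_step (z : List Bool) (efs : List (List Bool)) (u : List Bool)
    (hefs : ∀ e ∈ efs, e.length = z.length)
    (h : ∃ k, pvReach z efs k u) (hu : u ≠ z) :
    ∃ e ∈ efs, pvDist z efs (pvXor e u) + 1 = pvDist z efs u := by
  have hs := pvDist_spec z efs u h
  have hpos : pvDist z efs u ≠ 0 := fun h0 => hu (pvDist_eq_zero z efs u h h0)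
  obtain ⟨m, hm⟩ : ∃ m, pvDist z efs u = m + 1 := ⟨pvDist z efs u - 1, by omega⟩
  rw [hm] at hs
  obtain ⟨e, he, hr⟩ := pvReach_peel z efs m u hefs hs
  refine ⟨e, he, ?_⟩
  have hle : pvDist z efs (pvXor e u) ≤ m := pvDist_le z efs m _ hr
  have hulen : u.length = z.length := pvReach_length z efs (m+1) u hefs hs
  have hx : pvXor e (pvXor e u) = u :=
    pvXor_cancel e u (by rw [hefs e he, hulen])
  have hge : pvDist z efs u ≤ pvDist z efs (pvXor e u) + 1 := by
    have hrs := pvReach_step z efs _ (pvXor e u) e (pvDist_spec z efs _ ⟨m, hr⟩) he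
    rw [pvXor_comm _ e, hx] at hrs
    exact pvDist_le z efs _ u hrs
  omega

theorem pvTogA_eq_xor_eff (s : List Bool) (d : List Int) (n : Nat) (hs : s.length = n)
    (hv : ∀ x ∈ d, -(n:Int) ≤ x ∧ x < (n:Int)) : pvTogA s d = pvXor s (pvEff n d) := by
  have h1 : pvXor s (List.replicate n false) = s := by
    have := pvXor_false_right s
    rw [hs] at this; exact this
  calc pvTogA s d = pvTogA (pvXor s (List.replicate n false)) d := by rw [h1]
    _ = pvXor s (pvTogA (List.replicate n false) d) :=
        pvTogA_xor s d (List.replicate n false) (by simp [hs]) (by simpa using hv)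
    _ = pvXor s (pvEff n d) := rfl

-- ===== BFS invariant =====

def pvZ (t : List Bool) : List Bool := List.replicate t.length false
def pvEfs (ds : List (List Int)) (t : List Bool) : List (List Bool) := ds.map (pvEff t.length)
def pvChi (ds : List (List Int)) (t : List Bool) (e : List Int × List Bool × Int) : List Bool :=
  pvXor e.2.1 (pvEff t.length e.1)
def pvGood (ds : List (List Int)) (t : List Bool) (l : Nat) (e : List Int × List Bool × Int) : Prop :=
  e.1 ∈ ds ∧ e.2.2 = (l : Int) ∧ pvReach (pvZ t) (pvEfs ds t) l e.2.1

def pvFix (ds : List (List Int)) (t : List Bool) (Q : List (List Int × List Bool × Int))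
    (V : List (List Bool)) : Prop :=
  (∀ e ∈ Q, e.2.1 = t → e.2.2 = ((pvDist (pvZ t) (pvEfs ds t) t : Nat) : Int))
  ∧ (t ∈ V → ∃ e ∈ Q, e.2.1 = t)
  ∧ (∀ u : List Bool, (∃ k, pvReach (pvZ t) (pvEfs ds t) k u) → u ≠ pvZ t → u ∉ V →
      ∃ e ∈ Q, pvChi ds t e ∉ V ∧ pvDist (pvZ t) (pvEfs ds t) (pvChi ds t e) = e.2.2.toNat + 1
        ∧ pvDist (pvZ t) (pvEfs ds t) u
            = e.2.2.toNat + 1 + pvDist (pvZ t) (pvEfs ds t) (pvXor (pvChi ds t e) u))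

def pvInv (ds : List (List Int)) (t : List Bool) (Q : List (List Int × List Bool × Int))
    (V : List (List Bool)) : Prop :=
  ∃ l Q1 Q2, Q = Q1 ++ Q2
    ∧ (∀ e ∈ Q1, pvGood ds t l e) ∧ (∀ e ∈ Q2, pvGood ds t (l+1) e)
    ∧ (∀ w ∈ V, ∃ k ≤ l+1, pvReach (pvZ t) (pvEfs ds t) k w)
    ∧ pvFix ds t Q V

theorem pvEfs_len (ds : List (List Int)) (t : List Bool) :
    ∀ e ∈ pvEfs ds t, e.length = (pvZ t).length := by
  intro e he
  obtain ⟨d, _, rfl⟩ := List.mem_map.mp he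
  simp [pvEff_length, pvZ]

theorem pvZ_spec (t : List Bool) : pvZ t = List.replicate (pvZ t).length false := by
  simp [pvZ]

-- normalized head form of the invariant
theorem pvInv_norm (ds : List (List Int)) (t : List Bool) (e : List Int × List Bool × Int)
    (rest : List (List Int × List Bool × Int)) (V : List (List Bool))
    (h : pvInv ds t (e :: rest) V) :
    ∃ l Q1 Q2, rest = Q1 ++ Q2 ∧ pvGood ds t l e
      ∧ (∀ e' ∈ Q1, pvGood ds t l e') ∧ (∀ e' ∈ Q2, pvGood ds t (l+1) e')
      ∧ (∀ w ∈ V, ∃ k ≤ l+1, pvReach (pvZ t) (pvEfs ds t) k w)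
      ∧ pvFix ds t (e :: rest) V := by
  obtain ⟨l, Q1, Q2, hsplit, h1, h2, hV, hfix⟩ := h
  cases Q1 with
  | nil =>
    simp only [List.nil_append] at hsplit
    subst hsplit
    exact ⟨l+1, rest, [], by simp, h2 e (by simp), fun e' he' => h2 e' (by simp [he']),
      by simp, fun w hw => (hV w hw).imp fun k hk => ⟨by omega, hk.2⟩, hfix⟩
  | cons e1 Q1' =>
    simp only [List.cons_append] at hsplit
    injection hsplit with h_e h_r
    subst h_e; subst h_r
    exact ⟨l, Q1', Q2, rfl, h1 e (by simp), fun e' he' => h1 e' (by simp [he']), h2, hV, hfix⟩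

theorem pvInv_step (ds : List (List Int)) (t : List Bool) (hds : ds ≠ []) (ht : t ≠ pvZ t)
    (d : List Int) (s : List Bool) (p : Int)
    (rest : List (List Int × List Bool × Int)) (V : List (List Bool))
    (hInv : pvInv ds t ((d, s, p) :: rest) V) (hst : s ≠ t)
    (hwV : pvXor s (pvEff t.length d) ∉ V) :
    pvInv ds t (rest ++ ds.map (fun d' => (d', pvXor s (pvEff t.length d), p + 1)))
      (V ++ [pvXor s (pvEff t.length d)]) := by
  obtain ⟨l, Q1, Q2, hsplit, hgood, hQ1, hQ2, hV, hA5, hA6, hC⟩ :=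
    pvInv_norm ds t (d, s, p) rest V hInv
  have hefs : ∀ e ∈ pvEfs ds t, e.length = (pvZ t).length := pvEfs_len ds t
  have hzz : pvZ t = List.replicate (pvZ t).length false := pvZ_spec t
  obtain ⟨hd_ds, hp, hreach_s⟩ := hgood
  simp only at hp hreach_s
  have heffmem : pvEff t.length d ∈ pvEfs ds t := List.mem_map.mpr ⟨d, hd_ds, rfl⟩
  have hreach_w : pvReach (pvZ t) (pvEfs ds t) (l+1) (pvXor s (pvEff t.length d)) :=
    pvReach_step (pvZ t) (pvEfs ds t) l s _ hreach_s heffmem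
  have hdist_w_le : pvDist (pvZ t) (pvEfs ds t) (pvXor s (pvEff t.length d)) ≤ l + 1 :=
    pvDist_le (pvZ t) (pvEfs ds t) (l+1) _ hreach_w
  have hwlen : (pvXor s (pvEff t.length d)).length = (pvZ t).length :=
    pvReach_length (pvZ t) (pvEfs ds t) (l+1) _ hefs hreach_w
  have htagsN : ∀ e' ∈ (d, s, p) :: rest, e'.2.2.toNat = l ∨ e'.2.2.toNat = l + 1 := by
    intro e' he'
    rcases List.mem_cons.mp he' with rfl | he'
    · left; simp [hp]
    · rw [hsplit] at he'
      rcases List.mem_append.mp he' with h' | h'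
      · left; rw [(hQ1 e' h').2.1]; simp
      · right; rw [(hQ2 e' h').2.1]; simp
  have hdist_t : pvXor s (pvEff t.length d) = t → pvDist (pvZ t) (pvEfs ds t) t = l + 1 := by
    intro hwt
    have htV : t ∉ V := by rw [← hwt]; exact hwV
    have hrw := hreach_w
    rw [hwt] at hrw
    have hreach_t : ∃ k, pvReach (pvZ t) (pvEfs ds t) k t := ⟨l+1, hrw⟩
    obtain ⟨e'', he''Q, _, hd1, hd2⟩ := hC t hreach_t ht htV
    have hge : l + 1 ≤ pvDist (pvZ t) (pvEfs ds t) t := by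
      rcases htagsN e'' he''Q with h' | h' <;> omega
    have hle : pvDist (pvZ t) (pvEfs ds t) t ≤ l + 1 := by
      have := hdist_w_le
      rw [hwt] at this
      exact this
    omega
  refine ⟨l, Q1, Q2 ++ ds.map (fun d' => (d', pvXor s (pvEff t.length d), p + 1)),
    by rw [hsplit, List.append_assoc], hQ1, ?_, ?_, ?_, ?_, ?_⟩
  · -- goods of Q2 ++ children
    intro e' he'
    rcases List.mem_append.mp he' with h' | h'
    · exact hQ2 e' h'
    · obtain ⟨d', hd', rfl⟩ := List.mem_map.mp h'
      refine ⟨hd', ?_, hreach_w⟩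
      simp only [hp]
      push_cast
      ring
  · -- visited bound
    intro u hu
    rcases List.mem_append.mp hu with h' | h'
    · exact hV u h'
    · simp at h'; subst h'; exact ⟨l+1, le_refl _, hreach_w⟩
  · -- A5
    intro e' he' hse
    rcases List.mem_append.mp he' with h' | h'
    · exact hA5 e' (by simp [h']) hse
    · obtain ⟨d', hd', rfl⟩ := List.mem_map.mp h'
      simp only at hse
      rw [hdist_t hse, hp]
      push_cast
      ring
  · -- A6
    intro htV'
    rcases List.mem_append.mp htV' with h' | h'
    · obtain ⟨e'', he'', hs''⟩ := hA6 h'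
      rcases List.mem_cons.mp he'' with rfl | he''
      · exact absurd hs'' hst
      · exact ⟨e'', List.mem_append.mpr (Or.inl he''), hs''⟩
    · simp at h'
      obtain ⟨d0, hd0⟩ := List.exists_mem_of_ne_nil ds hds
      exact ⟨(d0, pvXor s (pvEff t.length d), p+1),
        List.mem_append.mpr (Or.inr (List.mem_map.mpr ⟨d0, hd0, rfl⟩)), h'.symm⟩
  · -- C*
    intro u hru hunz hunV'
    have hunV : u ∉ V := fun h' => hunV' (List.mem_append.mpr (Or.inl h'))
    have hunw : u ≠ pvXor s (pvEff t.length d) := fun h' => hunV' (by simp [h'])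
    obtain ⟨e', he', hχV, hd1, hd2⟩ := hC u hru hunz hunV
    by_cases hcw : pvChi ds t e' = pvXor s (pvEff t.length d)
    · -- the covering entry pointed at the newly expanded node: reroute through a child
      rw [hcw] at hd1 hd2
      have hτ : e'.2.2.toNat = l := by
        rcases htagsN e' he' with h' | h' <;> omega
      have hdw : pvDist (pvZ t) (pvEfs ds t) (pvXor s (pvEff t.length d)) = l + 1 := by omega
      have hulen : u.length = (pvZ t).length :=
        pvReach_length (pvZ t) (pvEfs ds t) _ u hefs hru.choose_spec
      have hreach_wx : ∃ k, pvReach (pvZ t) (pvEfs ds t) k (pvXor (pvXor s (pvEff t.length d)) u) := by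
        obtain ⟨ku, hku⟩ := hru
        exact ⟨l + 1 + ku, pvReach_comp (pvZ t) (pvEfs ds t) (l+1) ku _ u hefs hzz hreach_w hku⟩
      have hvz : pvXor (pvXor s (pvEff t.length d)) u ≠ pvZ t := by
        intro h0
        apply hunw
        have hcan : pvXor (pvXor s (pvEff t.length d)) (pvXor (pvXor s (pvEff t.length d)) u) = u :=
          pvXor_cancel _ u (by rw [hwlen, hulen])
        rw [h0] at hcan
        have hfr := pvXor_false_right (pvXor s (pvEff t.length d))
        rw [hwlen, ← hzz] at hfr
        rw [hfr] at hcan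
        exact hcan.symm
      obtain ⟨ef, hef, heq1⟩ := pvDist_first_step (pvZ t) (pvEfs ds t) _ hefs hreach_wx hvz
      obtain ⟨d', hd', hefd⟩ := List.mem_map.mp hef
      have heflen : ef.length = (pvZ t).length := hefs ef hef
      -- the child entry
      refine ⟨(d', pvXor s (pvEff t.length d), p + 1),
        List.mem_append.mpr (Or.inr (List.mem_map.mpr ⟨d', hd', rfl⟩)), ?_⟩
      have hch : pvChi ds t (d', pvXor s (pvEff t.length d), p + 1)
          = pvXor (pvXor s (pvEff t.length d)) ef := by
        simp [pvChi, hefd]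
      have hreach_w' : pvReach (pvZ t) (pvEfs ds t) (l+2)
          (pvXor (pvXor s (pvEff t.length d)) ef) :=
        pvReach_step (pvZ t) (pvEfs ds t) (l+1) _ ef hreach_w hef
      have hdw'_le : pvDist (pvZ t) (pvEfs ds t) (pvXor (pvXor s (pvEff t.length d)) ef) ≤ l + 2 :=
        pvDist_le (pvZ t) (pvEfs ds t) (l+2) _ hreach_w'
      -- χ(child) ⊕ u = ef ⊕ (w ⊕ u)
      have hassoc : pvXor (pvXor (pvXor s (pvEff t.length d)) ef) u
          = pvXor ef (pvXor (pvXor s (pvEff t.length d)) u) := by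
        rw [pvXor_assoc, pvXor_left_comm]
      -- triangle: dist u ≤ dist w' + dist (w' ⊕ u)
      have hw'len : (pvXor (pvXor s (pvEff t.length d)) ef).length = (pvZ t).length :=
        pvReach_length (pvZ t) (pvEfs ds t) (l+2) _ hefs hreach_w'
      have hreach_w'x : ∃ k, pvReach (pvZ t) (pvEfs ds t) k
          (pvXor (pvXor (pvXor s (pvEff t.length d)) ef) u) := by
        obtain ⟨ku, hku⟩ := hru
        exact ⟨l + 2 + ku, pvReach_comp (pvZ t) (pvEfs ds t) (l+2) ku _ u hefs hzz hreach_w' hku⟩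
      have htri : pvDist (pvZ t) (pvEfs ds t) u
          ≤ pvDist (pvZ t) (pvEfs ds t) (pvXor (pvXor s (pvEff t.length d)) ef)
            + pvDist (pvZ t) (pvEfs ds t) (pvXor (pvXor (pvXor s (pvEff t.length d)) ef) u) := by
        have hcomp := pvReach_comp (pvZ t) (pvEfs ds t) _ _ _ _ hefs hzz
          (pvDist_spec (pvZ t) (pvEfs ds t) _ ⟨l+2, hreach_w'⟩)
          (pvDist_spec (pvZ t) (pvEfs ds t) _ hreach_w'x)
        have hcan : pvXor (pvXor (pvXor s (pvEff t.length d)) ef)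
            (pvXor (pvXor (pvXor s (pvEff t.length d)) ef) u) = u :=
          pvXor_cancel _ u (by rw [hw'len, hulen])
        rw [hcan] at hcomp
        exact pvDist_le (pvZ t) (pvEfs ds t) _ u hcomp
      have hdchu : pvDist (pvZ t) (pvEfs ds t) (pvXor (pvXor (pvXor s (pvEff t.length d)) ef) u)
          + 1 = pvDist (pvZ t) (pvEfs ds t) (pvXor (pvXor s (pvEff t.length d)) u) := by
        rw [hassoc]
        exact heq1
      have hd2' : pvDist (pvZ t) (pvEfs ds t) u
          = l + 1 + pvDist (pvZ t) (pvEfs ds t) (pvXor (pvXor s (pvEff t.length d)) u) := by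
        omega
      have hdw' : pvDist (pvZ t) (pvEfs ds t) (pvXor (pvXor s (pvEff t.length d)) ef) = l + 2 := by
        omega
      have hptag : (p + 1).toNat = l + 1 := by rw [hp]; simp
      refine ⟨?_, ?_, ?_⟩
      · -- χ(child) not yet visited
        intro hmem
        rcases List.mem_append.mp hmem with h'' | h''
        · rw [hch] at h''
          obtain ⟨k, hk, hkr⟩ := hV _ h''
          have := pvDist_le (pvZ t) (pvEfs ds t) k _ hkr
          omega
        · simp only [List.mem_singleton] at h''
          rw [hch] at h''
          rw [h''] at hdw'
          omega
      · rw [hch, hdw']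
        simp only [hptag]
      · rw [hch]
        simp only [hptag]
        omega
    · have he'r : e' ∈ rest := by
        rcases List.mem_cons.mp he' with rfl | h'
        · exact absurd rfl hcw
        · exact h'
      refine ⟨e', List.mem_append.mpr (Or.inl he'r), ?_, hd1, hd2⟩
      intro h'
      rcases List.mem_append.mp h' with h'' | h''
      · exact hχV h''
      · simp at h''; exact hcw h''

theorem pvInv_skip (ds : List (List Int)) (t : List Bool)
    (d : List Int) (s : List Bool) (p : Int)
    (rest : List (List Int × List Bool × Int)) (V : List (List Bool))
    (hInv : pvInv ds t ((d, s, p) :: rest) V) (hst : s ≠ t)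
    (hwV : pvXor s (pvEff t.length d) ∈ V) : pvInv ds t rest V := by
  obtain ⟨l, Q1, Q2, hsplit, _, hQ1, hQ2, hV, hA5, hA6, hC⟩ :=
    pvInv_norm ds t (d, s, p) rest V hInv
  refine ⟨l, Q1, Q2, hsplit, hQ1, hQ2, hV, ?_, ?_, ?_⟩
  · exact fun e' he' => hA5 e' (by simp [he'])
  · intro htV
    obtain ⟨e'', he'', hs''⟩ := hA6 htV
    rcases List.mem_cons.mp he'' with rfl | he''
    · exact absurd hs'' hst
    · exact ⟨e'', he'', hs''⟩
  · intro u hru hunz hunV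
    obtain ⟨e', he', hχV, hd1, hd2⟩ := hC u hru hunz hunV
    rcases List.mem_cons.mp he' with rfl | he'
    · exact absurd hwV hχV
    · exact ⟨e', he', hχV, hd1, hd2⟩

theorem pvInv_init (ds : List (List Int)) (t : List Bool) (ht : t ≠ pvZ t) :
    pvInv ds t (ds.map fun d => (d, pvZ t, (0:Int))) [] := by
  have hefs : ∀ e ∈ pvEfs ds t, e.length = (pvZ t).length := pvEfs_len ds t
  have hzz : pvZ t = List.replicate (pvZ t).length false := pvZ_spec t
  refine ⟨0, ds.map fun d => (d, pvZ t, (0:Int)), [], by simp, ?_, by simp, by simp, ?_, by simp, ?_⟩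
  · intro e he
    obtain ⟨d0, hd0, rfl⟩ := List.mem_map.mp he
    exact ⟨hd0, rfl, (pvReach_zero _ _ _).mpr rfl⟩
  · intro e he hse
    obtain ⟨d0, hd0, rfl⟩ := List.mem_map.mp he
    simp only at hse
    exact absurd hse.symm ht
  · intro u hru hunz _
    obtain ⟨ef, hef, heq1⟩ := pvDist_first_step (pvZ t) (pvEfs ds t) u hefs hru hunz
    obtain ⟨d0, hd0, hefd⟩ := List.mem_map.mp hef
    refine ⟨(d0, pvZ t, (0:Int)), List.mem_map.mpr ⟨d0, hd0, rfl⟩, by simp, ?_, ?_⟩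
    all_goals
      have heflen : ef.length = (pvZ t).length := hefs ef hef
      have hzf : pvXor (pvZ t) ef = ef := by
        have := pvXor_false_left ef
        rw [heflen] at this
        rw [hzz]
        exact this
      have hch : pvChi ds t (d0, pvZ t, (0:Int)) = ef := by
        simp only [pvChi, hefd]
        exact hzf
      have hreach_ef : pvReach (pvZ t) (pvEfs ds t) 1 ef := by
        have := pvReach_step (pvZ t) (pvEfs ds t) 0 (pvZ t) ef
          ((pvReach_zero _ _ _).mpr rfl) hef
        rw [hzf] at this
        exact this
      have hd_ef_le : pvDist (pvZ t) (pvEfs ds t) ef ≤ 1 :=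
        pvDist_le (pvZ t) (pvEfs ds t) 1 ef hreach_ef
      have hd_ef_ne : pvDist (pvZ t) (pvEfs ds t) ef ≠ 0 := by
        intro h0
        have hefz : ef = pvZ t := pvDist_eq_zero (pvZ t) (pvEfs ds t) ef ⟨1, hreach_ef⟩ h0
        have hulen : u.length = (pvZ t).length :=
          pvReach_length (pvZ t) (pvEfs ds t) _ u hefs hru.choose_spec
        have hzu : pvXor ef u = u := by
          rw [hefz, hzz]
          have := pvXor_false_left u
          rw [hulen] at this
          exact this
        rw [hzu] at heq1
        omega
    · rw [hch]
      simp only [Int.toNat_zero]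
      omega
    · rw [hch]
      simp only [Int.toNat_zero]
      omega

theorem pvBfs_correct (ds : List (List Int)) (t : List Bool) (hds : ds ≠ [])
    (ht : t ≠ pvZ t)
    (hvalid : ∀ d ∈ ds, ∀ x ∈ d, -(t.length:Int) ≤ x ∧ x < (t.length:Int)) :
    ∀ Q V, pvInv ds t Q V →
      ((∃ k, pvReach (pvZ t) (pvEfs ds t) k t) →
          pvBfs ds t Q V = some ((pvDist (pvZ t) (pvEfs ds t) t : Nat) : Int))
      ∧ (¬ (∃ k, pvReach (pvZ t) (pvEfs ds t) k t) → pvBfs ds t Q V = none) := by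
  have hefs : ∀ e ∈ pvEfs ds t, e.length = (pvZ t).length := pvEfs_len ds t
  intro Q V
  induction Q, V using pvBfs.induct ds t with
  | case1 V =>
    intro hInv
    obtain ⟨l, Q1, Q2, hsplit, hQ1, hQ2, hV, hA5, hA6, hC⟩ := hInv
    constructor
    · intro hr
      exfalso
      by_cases htv : t ∈ V
      · obtain ⟨e, he, _⟩ := hA6 htv
        simp at he
      · obtain ⟨e, he, _⟩ := hC t hr ht htv
        simp at he
    · intro _
      simp [pvBfs]
  | case2 d p rest V =>
    intro hInv
    obtain ⟨l, Q1, Q2, hsplit, hgood, hQ1, hQ2, hV, hA5, hA6, hC⟩ :=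
      pvInv_norm ds t (d, t, p) rest V hInv
    have hreach : ∃ k, pvReach (pvZ t) (pvEfs ds t) k t := ⟨l, hgood.2.2⟩
    have hp : p = ((pvDist (pvZ t) (pvEfs ds t) t : Nat) : Int) :=
      hA5 (d, t, p) (by simp) rfl
    constructor
    · intro _
      simp [pvBfs, hp]
    · intro hnr
      exact absurd hreach hnr
  | case3 d s p rest V hst heq =>
    intro hInv
    obtain ⟨l, Q1, Q2, hsplit, hgood, hQ1, hQ2, hV, hA5, hA6, hC⟩ :=
      pvInv_norm ds t (d, s, p) rest V hInv
    exfalso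
    have hslen : s.length = t.length := by
      have := pvReach_length (pvZ t) (pvEfs ds t) l s hefs hgood.2.2
      simpa [pvZ] using this
    have := pvToggleAll_some s d (by rw [hslen]; exact hvalid d hgood.1)
    rw [heq] at this
    simp at this
  | case4 d s p rest V hst s' heq hmem ih =>
    intro hInv
    have hgood := (pvInv_norm ds t (d, s, p) rest V hInv).choose_spec.choose_spec.choose_spec.2.1
    have hslen : s.length = t.length := by
      have := pvReach_length (pvZ t) (pvEfs ds t) _ s hefs hgood.2.2
      simpa [pvZ] using this
    have hs' : s' = pvXor s (pvEff t.length d) := by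
      have h1 := pvToggleAll_some s d (by rw [hslen]; exact hvalid d hgood.1)
      rw [heq] at h1
      have h2 := pvTogA_eq_xor_eff s d t.length hslen (hvalid d hgood.1)
      injection h1 with h1
      rw [h1, h2]
    have hmem' : pvXor s (pvEff t.length d) ∈ V := by
      rw [← hs']
      exact (PySem.Set.contains_iff V s').mp hmem
    have hstep : pvBfs ds t ((d, s, p) :: rest) V = pvBfs ds t rest V := by
      rw [pvBfs]
      simp [hst, heq, (PySem.Set.contains_iff V s').mp hmem]
    rw [hstep]
    exact ih (pvInv_skip ds t d s p rest V hInv hst hmem')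
  | case5 d s p rest V hst s' heq hmem hlen ih =>
    intro hInv
    have hgood := (pvInv_norm ds t (d, s, p) rest V hInv).choose_spec.choose_spec.choose_spec.2.1
    have hslen : s.length = t.length := by
      have := pvReach_length (pvZ t) (pvEfs ds t) _ s hefs hgood.2.2
      simpa [pvZ] using this
    have hs' : s' = pvXor s (pvEff t.length d) := by
      have h1 := pvToggleAll_some s d (by rw [hslen]; exact hvalid d hgood.1)
      rw [heq] at h1
      have h2 := pvTogA_eq_xor_eff s d t.length hslen (hvalid d hgood.1)
      injection h1 with h1
      rw [h1, h2]
    have hmem2 : pvXor s (pvEff t.length d) ∉ V := by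
      rw [← hs']
      intro h'
      exact hmem ((PySem.Set.contains_iff V s').mpr h')
    have hadd : PySem.Set.add V s' = V ++ [s'] :=
      PySem.Set.add_of_not_mem (fun h' => hmem ((PySem.Set.contains_iff V s').mpr h'))
    have hstep : pvBfs ds t ((d, s, p) :: rest) V
        = pvBfs ds t (rest ++ ds.map fun d' => (d', s', p + 1)) (PySem.Set.add V s') := by
      rw [pvBfs]
      simp only [if_neg hst, heq]
      rw [if_neg hmem, dif_pos hlen]
    have hattach : (List.map (fun x : {x // x ∈ ds} => match x with | ⟨d', _⟩ => (d', s', p + 1)) ds.attach) = ds.map fun d' => (d', s', p + 1) := by simp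
    rw [hattach, hadd] at ih
    rw [hstep, hadd]
    have hstep2 := pvInv_step ds t hds ht d s p rest V hInv hst hmem2
    rw [← hs'] at hstep2
    exact ih hstep2
  | case6 d s p rest V hst s' heq hmem hlen =>
    intro hInv
    exfalso
    have hgood := (pvInv_norm ds t (d, s, p) rest V hInv).choose_spec.choose_spec.choose_spec.2.1
    have hslen : s.length = t.length := by
      have := pvReach_length (pvZ t) (pvEfs ds t) _ s hefs hgood.2.2
      simpa [pvZ] using this
    have hs' : s' = pvXor s (pvEff t.length d) := by
      have h1 := pvToggleAll_some s d (by rw [hslen]; exact hvalid d hgood.1)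
      rw [heq] at h1
      have h2 := pvTogA_eq_xor_eff s d t.length hslen (hvalid d hgood.1)
      injection h1 with h1
      rw [h1, h2]
    apply hlen
    rw [hs', pvXor_length, pvEff_length, hslen]
    simp

theorem pvEffect_some (d : List Int) (n : Nat)
    (hv : ∀ x ∈ d, -(n:Int) ≤ x ∧ x < (n:Int)) : pvEffect d n = some (pvEff n d) :=
  pvToggleAll_some (List.replicate n false) d (by simpa using hv)

theorem pvSeq_map_some {α : Type} (l : List α) (f : α → Option (List Bool)) (g : α → List Bool)
    (h : ∀ a ∈ l, f a = some (g a)) : pvSeq (l.map f) = some (l.map g) := by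
  induction l with
  | nil => rfl
  | cons a l ih =>
    simp only [List.map_cons, pvSeq, h a (by simp), Option.bind_some,
      ih (fun a' ha' => h a' (by simp [ha']))]
    rfl

theorem pvConsSublistDrop {α : Type} (e : α) (l' : List α) (xs : List α) :
    ∀ j : Nat, ((e :: l').Sublist (xs.drop j) ↔
      ∃ i, j ≤ i ∧ i < xs.length ∧ xs[i]? = some e ∧ l'.Sublist (xs.drop (i+1))) := by
  intro j
  induction hfuel : xs.length - j generalizing j with
  | zero =>
    have hj : xs.length ≤ j := by omega
    rw [List.drop_eq_nil_of_le hj]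
    simp only [List.sublist_nil]
    constructor
    · intro h; exact absurd h (by simp)
    · rintro ⟨i, hji, hilen, _⟩; omega
  | succ m ih =>
    have hj : j < xs.length := by omega
    rw [List.drop_eq_getElem_cons hj]
    constructor
    · intro h
      cases h with
      | cons _ h' =>
        obtain ⟨i, hji, hilen, hie, hsub⟩ := (ih (j+1) (by omega)).mp h'
        exact ⟨i, by omega, hilen, hie, hsub⟩
      | cons₂ _ h' =>
        exact ⟨j, le_refl j, hj, by simp, h'⟩
    · rintro ⟨i, hji, hilen, hie, hsub⟩
      by_cases hij : i = j
      · subst hij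
        have hxe : xs[i] = e := by
          rw [List.getElem?_eq_getElem hilen] at hie
          exact Option.some.inj hie
        rw [hxe]
        exact List.Sublist.cons₂ _ hsub
      · apply List.Sublist.cons
        exact (ih (j+1) (by omega)).mpr ⟨i, by omega, hilen, hie, hsub⟩

theorem pvSearch_iff (efs : List (List Bool)) (t : List Bool) (k : Nat) :
    ∀ (start : Nat) (acc : List Bool),
      (pvSearch efs t (start : Int) k acc = true ↔
        ∃ l : List (List Bool), l.Sublist (efs.drop start) ∧ l.length = k ∧ l.foldl pvXor acc = t) := by
  induction k with
  | zero =>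
    intro start acc
    simp only [pvSearch, decide_eq_true_eq]
    constructor
    · rintro rfl; exact ⟨[], by simp, rfl, rfl⟩
    · rintro ⟨l, _, hl, hf⟩
      rw [List.length_eq_zero_iff.mp hl] at hf
      exact hf.symm ▸ rfl
  | succ k ih =>
    intro start acc
    rw [pvSearch, List.any_eq_true]
    constructor
    · rintro ⟨i, hi, hfi⟩
      rw [PySem.List.mem_pyRange_one] at hi
      obtain ⟨hi1, hi2⟩ := hi
      have hi0 : 0 ≤ i := le_trans (by positivity) hi1
      have hilen : i.toNat < efs.length := by omega
      rw [PySem.List.pyGet?_of_nonneg efs hi0, List.getElem?_eq_getElem hilen] at hfi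
      simp only at hfi
      have hcast : ((i.toNat : Int)) = i := by omega
      have := (ih (i.toNat + 1) (pvXor acc efs[i.toNat])).mp (by
        have : ((i.toNat + 1 : Nat) : Int) = i + 1 := by omega
        rw [this]
        exact hfi)
      obtain ⟨l', hsub, hlen, hfold⟩ := this
      refine ⟨efs[i.toNat] :: l', ?_, by simp [hlen], by simpa using hfold⟩
      exact (pvConsSublistDrop _ _ _ start).mpr
        ⟨i.toNat, by omega, hilen, by simp, hsub⟩
    · rintro ⟨l, hsub, hlen, hfold⟩
      cases l with
      | nil => simp at hlen
      | cons e l' =>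
        obtain ⟨i, hji, hilen, hie, hsub'⟩ := (pvConsSublistDrop e l' efs start).mp hsub
        have hlen' : l'.length = k := by simpa using hlen
        have hbound : l'.length ≤ efs.length - (i+1) := by
          have := hsub'.length_le
          simpa using this
        refine ⟨(i : Int), ?_, ?_⟩
        · rw [PySem.List.mem_pyRange_one]
          constructor
          · omega
          · push_cast; omega
        · have hei : efs[i]'hilen = e := by
            rw [List.getElem?_eq_getElem hilen] at hie
            exact Option.some.inj hie
          rw [PySem.List.pyGet?_of_nonneg efs (by positivity), List.getElem?_eq_getElem (by omega : ((i:Int).toNat) < efs.length)]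
          simp only
          have hcast : ((i : Int).toNat) = i := by omega
          apply (ih ((i:Int).toNat + 1) _).mpr
          refine ⟨l', ?_, hlen', ?_⟩
          · rw [hcast]; exact hsub'
          · have : efs[(i:Int).toNat]'(by omega) = e := by
              simp only [hcast]; exact hei
            rw [this]
            simpa using hfold

theorem pvFoldl_perm (l1 l2 : List (List Bool)) (h : l1.Perm l2) (b : List Bool) :
    l1.foldl pvXor b = l2.foldl pvXor b :=
  @List.Perm.foldl_eq _ _ pvXor _ _
    ⟨fun b a1 a2 => by rw [pvXor_assoc, pvXor_assoc, pvXor_comm a1 a2]⟩ h b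

theorem pvSeqToSublist (efs : List (List Bool)) (z : List Bool)
    (hefs : ∀ e ∈ efs, e.length = z.length) :
    ∀ (m : Nat) (l : List (List Bool)), l.length ≤ m → (∀ e ∈ l, e ∈ efs) →
    ∃ l' : List (List Bool), l'.Sublist efs ∧ l'.length ≤ l.length
      ∧ l'.foldl pvXor z = l.foldl pvXor z := by
  intro m
  induction m with
  | zero =>
    intro l hl _
    have hle : l = [] := List.length_eq_zero_iff.mp (by omega)
    subst hle
    exact ⟨[], by simp, by simp, rfl⟩
  | succ m ih =>
    intro l hl hm
    by_cases hnd : l.Nodup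
    · obtain ⟨l'', hperm, hsub⟩ := List.subperm_of_subset hnd (fun e he => hm e he)
      exact ⟨l'', hsub, by rw [hperm.length_eq], pvFoldl_perm l'' l hperm z⟩
    · have hdup : ∃ a, 2 ≤ List.count a l := by
        by_contra hcon
        push_neg at hcon
        exact hnd (List.nodup_iff_count_le_one.mpr (fun a => by have := hcon a; omega))
      obtain ⟨a, ha2⟩ := hdup
      have hal : a ∈ l := List.count_pos_iff.mp (by omega)
      have hperm1 : l.Perm (a :: l.erase a) := List.perm_cons_erase hal
      have hae : a ∈ l.erase a := List.count_pos_iff.mp (by rw [List.count_erase_self]; omega)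
      have hperm2 : (l.erase a).Perm (a :: (l.erase a).erase a) := List.perm_cons_erase hae
      have hperm : l.Perm (a :: a :: (l.erase a).erase a) :=
        hperm1.trans (List.Perm.cons a hperm2)
      have halen : a.length = z.length := hefs a (hm a hal)
      have hfold : l.foldl pvXor z = ((l.erase a).erase a).foldl pvXor z := by
        rw [pvFoldl_perm l _ hperm z]
        simp only [List.foldl_cons]
        have : pvXor (pvXor z a) a = z := by
          rw [pvXor_assoc, pvXor_self, halen]
          exact pvXor_false_right z
        rw [this]
      have hsubset : ∀ e ∈ (l.erase a).erase a, e ∈ efs :=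
        fun e he => hm e (List.mem_of_mem_erase (List.mem_of_mem_erase he))
      have hlen2 : ((l.erase a).erase a).length ≤ m := by
        have h1 := List.length_erase_of_mem hal
        have h2 := List.length_erase_of_mem hae
        have h3 : 1 ≤ l.length := List.length_pos_of_mem hal
        omega
      obtain ⟨l', hs', hle', hf'⟩ := ih ((l.erase a).erase a) hlen2 hsubset
      refine ⟨l', hs', ?_, by rw [hf', hfold]⟩
      have h1 := List.length_erase_of_mem hal
      have h2 := List.length_erase_of_mem hae
      omega

theorem pvFindSome_none (f : Int → Option Int) :
    ∀ (a b : Int), (∀ i, a ≤ i → i < b → f i = none) →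
      (PySem.List.pyRange a b 1).findSome? f = none := by
  intro a b
  induction hfuel : (b - a).toNat generalizing a with
  | zero =>
    intro _
    rw [PySem.List.pyRange_one_eq_nil (by omega)]
    rfl
  | succ m ih =>
    intro h
    rw [PySem.List.pyRange_one_cons (by omega), List.findSome?_cons]
    rw [h a (le_refl a) (by omega)]
    exact ih (a+1) (by omega) (fun i h1 h2 => h i (by omega) h2)

theorem pvFindSome_first (f : Int → Option Int) (m : Int) (r : Int) (hr : f m = some r) :
    ∀ (a : Int) (b : Int), a ≤ m → m < b → (∀ i, a ≤ i → i < m → f i = none) →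
      (PySem.List.pyRange a b 1).findSome? f = some r := by
  intro a b
  induction hfuel : (b - a).toNat generalizing a with
  | zero => intro h1 h2 _; omega
  | succ k ih =>
    intro h1 h2 h3
    rw [PySem.List.pyRange_one_cons (by omega), List.findSome?_cons]
    by_cases ham : a = m
    · subst ham
      rw [hr]
    · rw [h3 a (le_refl a) (by omega)]
      exact ih (a+1) (by omega) (by omega) h2 (fun i hi1 hi2 => h3 i (by omega) hi2)

theorem pvSublist_reach (ds : List (List Int)) (t u : List Bool) (l : List (List Bool))
    (hsub : l.Sublist (pvEfs ds t)) (hfold : l.foldl pvXor (pvZ t) = u) :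
    pvReach (pvZ t) (pvEfs ds t) l.length u :=
  ⟨l, rfl, fun e he => hsub.subset he, hfold⟩

theorem pvAlt_correct (ds : List (List Int)) (t : List Bool) (ht : t ≠ pvZ t) :
    ((∃ k, pvReach (pvZ t) (pvEfs ds t) k t) →
      ((PySem.List.pyRange 1 ((ds.length : Int) + 1) 1).findSome? fun k =>
        if pvSearch (pvEfs ds t) t 0 k.toNat (pvZ t) then some k else none)
        = some ((pvDist (pvZ t) (pvEfs ds t) t : Nat) : Int))
    ∧ (¬ (∃ k, pvReach (pvZ t) (pvEfs ds t) k t) →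
      ((PySem.List.pyRange 1 ((ds.length : Int) + 1) 1).findSome? fun k =>
        if pvSearch (pvEfs ds t) t 0 k.toNat (pvZ t) then some k else none)
        = none) := by
  have hefs : ∀ e ∈ pvEfs ds t, e.length = (pvZ t).length := pvEfs_len ds t
  have hlenefs : (pvEfs ds t).length = ds.length := by simp [pvEfs]
  constructor
  · intro hre
    have hm1 : 1 ≤ pvDist (pvZ t) (pvEfs ds t) t := by
      rcases Nat.eq_zero_or_pos (pvDist (pvZ t) (pvEfs ds t) t) with h0 | h1
      · exact absurd (pvDist_eq_zero _ _ _ hre h0) ht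
      · exact h1
    obtain ⟨l, hlen, hmem, hfold⟩ := pvDist_spec (pvZ t) (pvEfs ds t) t hre
    obtain ⟨l', hsub, hle, hfold'⟩ :=
      pvSeqToSublist (pvEfs ds t) (pvZ t) hefs l.length l (le_refl _) hmem
    have hreach' := pvSublist_reach ds t t l' hsub (by rw [hfold', hfold])
    have hge := pvDist_le (pvZ t) (pvEfs ds t) _ t hreach'
    have hexact : l'.length = pvDist (pvZ t) (pvEfs ds t) t := by omega
    have hmL : pvDist (pvZ t) (pvEfs ds t) t ≤ ds.length := by
      have := hsub.length_le
      omega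
    apply pvFindSome_first _ ((pvDist (pvZ t) (pvEfs ds t) t : Nat) : Int)
    · rw [if_pos]
      · rw [Int.toNat_natCast]
        apply (pvSearch_iff (pvEfs ds t) t _ 0 (pvZ t)).mpr
        exact ⟨l', by simpa using hsub, hexact, by rw [hfold', hfold]⟩
    · omega
    · omega
    · intro i hi1 hi2
      rw [if_neg]
      intro hsr
      obtain ⟨l'', hsub'', hlen'', hfold''⟩ :=
        (pvSearch_iff (pvEfs ds t) t _ 0 (pvZ t)).mp hsr
      have := pvDist_le (pvZ t) (pvEfs ds t) _ t
        (pvSublist_reach ds t t l'' (by simpa using hsub'') hfold'')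
      omega
  · intro hnr
    apply pvFindSome_none
    intro i hi1 hi2
    rw [if_neg]
    intro hsr
    obtain ⟨l'', hsub'', hlen'', hfold''⟩ :=
      (pvSearch_iff (pvEfs ds t) t _ 0 (pvZ t)).mp hsr
    exact hnr ⟨l''.length, pvSublist_reach ds t t l'' (by simpa using hsub'') hfold''⟩

theorem pvMain (t : List Bool) (ds : List (List Int)) (x : Int)
    (hPre : (∀ d ∈ ds, ∀ y ∈ d, -(t.length:Int) ≤ y ∧ y < (t.length:Int))
      ∨ (t = List.replicate t.length false ∧ ds ≠ []))
    (hND : ¬ (ds = [] ∧ t = List.replicate t.length false)) :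
    findMinimumButtonsPressedForMachine (t, ds, x) = findMinimumButtonsPressedForMachine_alt (t, ds, x) := by
  by_cases hz : t = List.replicate t.length false
  · have hds : ds ≠ [] := fun h => hND ⟨h, hz⟩
    obtain ⟨d0, ds', rfl⟩ : ∃ d0 ds', ds = d0 :: ds' := by
      cases ds with
      | nil => exact absurd rfl hds
      | cons a b => exact ⟨a, b, rfl⟩
    show pvBfs _ t ((d0, List.replicate t.length false, 0) :: _) _ = _
    rw [pvBfs]
    rw [if_pos hz.symm]
    show some 0 = findMinimumButtonsPressedForMachine_alt _
    unfold findMinimumButtonsPressedForMachine_alt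
    rw [if_pos hz]
  · have hvalid : ∀ d ∈ ds, ∀ y ∈ d, -(t.length:Int) ≤ y ∧ y < (t.length:Int) := by
      rcases hPre with h | ⟨h1, _⟩
      · exact h
      · exact absurd h1 hz
    have ht : t ≠ pvZ t := hz
    by_cases hds : ds = []
    · subst hds
      show pvBfs [] t [] PySem.Set.empty = _
      rw [pvBfs]
      unfold findMinimumButtonsPressedForMachine_alt
      rw [if_neg hz]
      have hnil : PySem.List.pyRange 1 ((List.length ([] : List (List Int)) : Int) + 1) 1 = [] :=
        PySem.List.pyRange_one_eq_nil (by simp)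
      simp [pvSeq, hnil]
    · have hcorrA := pvBfs_correct ds t hds ht hvalid
        (ds.map fun d => (d, pvZ t, (0:Int))) [] (pvInv_init ds t ht)
      have hcorrB := pvAlt_correct ds t ht
      have hA : findMinimumButtonsPressedForMachine (t, ds, x) = pvBfs ds t (ds.map fun d => (d, pvZ t, (0:Int))) [] := rfl
      have hB : findMinimumButtonsPressedForMachine_alt (t, ds, x)
          = ((PySem.List.pyRange 1 ((ds.length : Int) + 1) 1).findSome? fun k =>
              if pvSearch (pvEfs ds t) t 0 k.toNat (pvZ t) then some k else none) := by
        unfold findMinimumButtonsPressedForMachine_alt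
        rw [if_neg hz]
        have hseq : pvSeq (ds.map fun d => pvEffect d t.length) = some (pvEfs ds t) :=
          pvSeq_map_some ds _ (pvEff t.length) (fun d hd => pvEffect_some d t.length (hvalid d hd))
        rw [hseq]
        rfl
      rw [hA, hB]
      by_cases hre : ∃ k, pvReach (pvZ t) (pvEfs ds t) k t
      · rw [hcorrA.1 hre, hcorrB.1 hre]
      · rw [hcorrA.2 hre, hcorrB.2 hre]

-- ===== VERDICT (by name: the statement is the Claim_ definition above) =====
theorem findMinimumButtonsPressedForMachine_spec : Claim_unchanged_findMinimumButtonsPressedForMachine := by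
  intro machine hDom hPre hND
  obtain ⟨t, ds, x⟩ := machine
  unfold Pre_findMinimumButtonsPressedForMachine at hPre
  unfold D_findMinimumButtonsPressedForMachine at hND
  exact pvMain t ds x hPre hND

theorem findMinimumButtonsPressedForMachine_changed : Claim_changed_findMinimumButtonsPressedForMachine := by
  unfold Claim_changed_findMinimumButtonsPressedForMachine
  refine ⟨by decide, by decide, by decide, ?_, by decide, by decide⟩
  simp [pvDiffWitness_findMinimumButtonsPressedForMachine,
    pvDiffWitnessOut_findMinimumButtonsPressedForMachine,
    findMinimumButtonsPressedForMachine, pvBfs]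

theorem findMinimumButtonsPressedForMachine_tight : Claim_exact_findMinimumButtonsPressedForMachine := by
  intro machine hDom hPre hD
  obtain ⟨t, ds, x⟩ := machine
  unfold D_findMinimumButtonsPressedForMachine at hD
  obtain ⟨h1, h2⟩ := hD
  simp only at h1 h2
  subst h1
  have hA : findMinimumButtonsPressedForMachine (t, [], x) = none := by
    show pvBfs [] t [] PySem.Set.empty = none
    rw [pvBfs]
  have hB : findMinimumButtonsPressedForMachine_alt (t, [], x) = some 0 := by
    unfold findMinimumButtonsPressedForMachine_alt
    rw [if_pos h2]
  rw [hA, hB]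
  simp
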